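-- pv_equiv track=rewrite | github.com/meseret-ale/hackerrank | pageCount.py | pageCount
-- ===== SOURCE A (Python) =====
-- def pageCount(n, p):
--     # Write your code here
--
--     right = 1
--     counter1 = 0
--     while right < p:
--         right += 2
--         counter1 += 1
--     if n % 2 == 0:
--         left = n
--     else:
--         left = n - 1
--     counter2 = 0
--     while left > p:
--         left -= 2
--         counter2 += 1
--     if counter1 > counter2:
--         return counter2
--     return counter1
-- ===== SOURCE B (Python) =====
-- def pageCount(n, p):
--     front = max(0, p // 2)
--     back = max(0, (2 * (n // 2) - p + 1) // 2)
--     return min(front, back)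
-- ===== Notes on version B (the rewrite author's own statement) =====
-- stated objective: faster
-- what changed: Replaced A's two unit-step counting while-loops with a closed-form computation: front turns = max(0, p//2), back turns = max(0, (2*(n//2) - p + 1)//2), returning their min.
import Mathlib
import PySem

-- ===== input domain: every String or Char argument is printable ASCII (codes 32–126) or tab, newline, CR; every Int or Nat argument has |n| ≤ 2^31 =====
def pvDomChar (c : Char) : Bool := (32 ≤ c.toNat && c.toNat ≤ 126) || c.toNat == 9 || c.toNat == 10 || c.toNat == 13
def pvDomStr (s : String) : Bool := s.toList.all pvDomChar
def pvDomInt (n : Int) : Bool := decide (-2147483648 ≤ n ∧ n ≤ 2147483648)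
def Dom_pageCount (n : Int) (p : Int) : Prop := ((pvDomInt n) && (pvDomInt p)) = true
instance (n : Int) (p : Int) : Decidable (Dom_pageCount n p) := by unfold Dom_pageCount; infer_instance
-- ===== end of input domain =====

-- B replaces A's two counting loops by closed-form floor-division arithmetic (O(1) instead of O(n+p)).

-- ===== PORT A =====
-- while right < p: right += 2; counter1 += 1
def pageCountLoop1 (p : Int) (right : Int) (c : Int) : Int :=
  if right < p then pageCountLoop1 p (right + 2) (c + 1) else c
termination_by (p - right).toNat
decreasing_by omega

-- while left > p: left -= 2; counter2 += 1
def pageCountLoop2 (p : Int) (left : Int) (c : Int) : Int :=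
  if left > p then pageCountLoop2 p (left - 2) (c + 1) else c
termination_by (left - p).toNat
decreasing_by omega

def pageCount (n : Int) (p : Int) : Int :=
  let counter1 := pageCountLoop1 p 1 0
  let left : Int := if PySem.Int.mod n 2 = 0 then n else n - 1
  let counter2 := pageCountLoop2 p left 0
  if counter1 > counter2 then counter2 else counter1

-- ===== PORT B =====
def pageCount_alt (n : Int) (p : Int) : Int :=
  let front := max 0 (PySem.Int.floordiv p 2)
  let back := max 0 (PySem.Int.floordiv (2 * PySem.Int.floordiv n 2 - p + 1) 2)
  min front back

-- ===== PRECONDITION & SPEC =====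
def Spec_pageCount (n : Int) (p : Int) (out : Int) : Prop := out = pageCount_alt n p
instance (n : Int) (p : Int) (out : Int) : Decidable (Spec_pageCount n p out) := by unfold Spec_pageCount; infer_instance

-- ===== CLAIM (what is proved, stated in full; the proofs are below) =====
def Claim_equal_pageCount : Prop := ∀ (n : Int) (p : Int), Dom_pageCount n p → Spec_pageCount n p (pageCount n p)

-- ===== LEMMAS AND PROOFS =====
theorem pageCountLoop1_spec (p right c : Int) :
    pageCountLoop1 p right c = c + max 0 ((p - right + 1) / 2) := by
  fun_induction pageCountLoop1 p right c with
  | case1 right c h ih => rw [ih]; omega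
  | case2 right c h => omega

theorem pageCountLoop2_spec (p left c : Int) :
    pageCountLoop2 p left c = c + max 0 ((left - p + 1) / 2) := by
  fun_induction pageCountLoop2 p left c with
  | case1 left c h ih => rw [ih]; omega
  | case2 left c h => omega

-- ===== VERDICT (by name: the statement is the Claim_ definition above) =====
theorem pageCount_spec : Claim_equal_pageCount := by
  intro n p _
  show pageCount n p = pageCount_alt n p
  simp only [pageCount, pageCount_alt,
    PySem.Int.mod_eq_emod_of_pos (show (0:Int) < 2 by norm_num),
    PySem.Int.floordiv_eq_ediv_of_pos (show (0:Int) < 2 by norm_num),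
    pageCountLoop1_spec, pageCountLoop2_spec]
  split <;> omega
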